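-- pv_equiv track=rewrite | github.com/naum2137/Algorytmy | zadania_lab/project3/main.py | z7_dodaj_cyfry
-- ===== SOURCE A (Python) =====
-- def z7_dodaj_cyfry(c_tab_tab_we: list[list[int]], ile_cyfr: int) -> list[list[int]]:
--     if ile_cyfr < 1:
--         return c_tab_tab_we
--     c_tab_tab_wy = []
--     for li in range(len(c_tab_tab_we)):
--         c_tab_org = c_tab_tab_we[li]
--         for cyfra in range(10):
--             c_tab_nowa = c_tab_org.copy()
--             c_tab_nowa.append(cyfra)
--             c_tab_tab_wy.append(c_tab_nowa)
--     return z7_dodaj_cyfry(c_tab_tab_wy, ile_cyfr - 1)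
-- ===== SOURCE B (Python) =====
-- from itertools import product
--
-- def z7_dodaj_cyfry(c_tab_tab_we: list[list[int]], ile_cyfr: int) -> list[list[int]]:
--     if ile_cyfr < 1:
--         return c_tab_tab_we
--     return [org + list(suf)
--             for org in c_tab_tab_we
--             for suf in product(range(10), repeat=ile_cyfr)]
-- ===== Notes on version B (the rewrite author's own statement) =====
-- stated objective: simpler
-- what changed: Replaces A's recursion that rebuilds the whole list-of-lists once per digit with a single pass that precomputes all ile_cyfr-digit suffixes (itertools.product) and appends each suffix to each input list in one comprehension.
import Mathlib
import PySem

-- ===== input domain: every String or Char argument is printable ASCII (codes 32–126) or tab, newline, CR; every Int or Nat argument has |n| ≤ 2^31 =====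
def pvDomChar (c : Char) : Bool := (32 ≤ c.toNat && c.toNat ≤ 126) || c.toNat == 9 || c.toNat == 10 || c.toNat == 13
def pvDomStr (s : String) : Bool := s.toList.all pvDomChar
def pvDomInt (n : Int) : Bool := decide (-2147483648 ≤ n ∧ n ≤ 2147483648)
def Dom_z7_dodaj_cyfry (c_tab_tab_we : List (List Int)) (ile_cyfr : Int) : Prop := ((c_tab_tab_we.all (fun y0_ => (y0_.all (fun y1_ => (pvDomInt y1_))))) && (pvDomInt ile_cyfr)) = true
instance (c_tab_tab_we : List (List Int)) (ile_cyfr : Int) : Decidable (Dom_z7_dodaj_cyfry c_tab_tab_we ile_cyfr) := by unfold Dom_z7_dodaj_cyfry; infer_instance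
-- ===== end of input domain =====

-- B replaces A's per-digit rebuild recursion by precomputing all digit suffixes once
-- and appending each to each input list in a single pass (objective: simpler).

-- ===== PORT A =====
-- A: if ile_cyfr < 1 return the input; else build c_tab_tab_wy by, for each list, for each
-- digit 0..9, appending (copy + append digit); recurse with ile_cyfr - 1.
def z7_dodaj_cyfry (c_tab_tab_we : List (List Int)) (ile_cyfr : Int) : List (List Int) :=
  if ile_cyfr < 1 then c_tab_tab_we
  else
    z7_dodaj_cyfry
      (c_tab_tab_we.foldl
        (fun acc c_tab_org =>
          (PySem.List.pyRange 0 10 1).foldl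
            (fun acc2 cyfra => acc2 ++ [c_tab_org ++ [cyfra]]) acc)
        [])
      (ile_cyfr - 1)
termination_by ile_cyfr.toNat
decreasing_by omega

-- ===== PORT B =====
-- all digit sequences of length k, lexicographic (= itertools.product(range(10), repeat=k))
def pvSuffixes : Nat → List (List Int)
  | 0 => [[]]
  | k + 1 => (PySem.List.pyRange 0 10 1).flatMap (fun d => (pvSuffixes k).map (fun t => d :: t))

def z7_dodaj_cyfry_alt (c_tab_tab_we : List (List Int)) (ile_cyfr : Int) : List (List Int) :=
  if ile_cyfr < 1 then c_tab_tab_we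
  else c_tab_tab_we.flatMap (fun org => (pvSuffixes ile_cyfr.toNat).map (fun suf => org ++ suf))

-- ===== PRECONDITION & SPEC =====
def Spec_z7_dodaj_cyfry (c_tab_tab_we : List (List Int)) (ile_cyfr : Int) (out : List (List Int)) : Prop := out = z7_dodaj_cyfry_alt c_tab_tab_we ile_cyfr
instance (c_tab_tab_we : List (List Int)) (ile_cyfr : Int) (out : List (List Int)) : Decidable (Spec_z7_dodaj_cyfry c_tab_tab_we ile_cyfr out) := by unfold Spec_z7_dodaj_cyfry; infer_instance

-- ===== CLAIM (what is proved, stated in full; the proofs are below) =====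
def Claim_equal_z7_dodaj_cyfry : Prop := ∀ (c_tab_tab_we : List (List Int)) (ile_cyfr : Int), Dom_z7_dodaj_cyfry c_tab_tab_we ile_cyfr → Spec_z7_dodaj_cyfry c_tab_tab_we ile_cyfr (z7_dodaj_cyfry c_tab_tab_we ile_cyfr)

-- ===== LEMMAS AND PROOFS =====

-- A's double loop builds exactly "each list extended by each single digit", in order
lemma z7_expand_eq (xs : List (List Int)) :
    xs.foldl
      (fun acc c_tab_org =>
        (PySem.List.pyRange 0 10 1).foldl
          (fun acc2 cyfra => acc2 ++ [c_tab_org ++ [cyfra]]) acc)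
      [] =
    xs.flatMap (fun org => (PySem.List.pyRange 0 10 1).map (fun d => org ++ [d])) := by
  have h : ∀ (xs : List (List Int)) (acc : List (List Int)),
      xs.foldl
        (fun acc c_tab_org =>
          (PySem.List.pyRange 0 10 1).foldl
            (fun acc2 cyfra => acc2 ++ [c_tab_org ++ [cyfra]]) acc)
        acc =
      acc ++ xs.flatMap (fun org => (PySem.List.pyRange 0 10 1).map (fun d => org ++ [d])) := by
    intro xs
    induction xs with
    | nil => simp
    | cons y ys ih =>
      intro acc
      rw [List.foldl_cons, List.flatMap_cons, PySem.List.foldl_append_singleton_eq_map,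
        ih, List.append_assoc]
  simpa using h xs []

-- A at a nonnegative step count appends every suffix of that length to every list
lemma z7_main (k : Nat) (xs : List (List Int)) :
    z7_dodaj_cyfry xs (k : Int) =
      xs.flatMap (fun org => (pvSuffixes k).map (fun suf => org ++ suf)) := by
  induction k generalizing xs with
  | zero =>
    rw [z7_dodaj_cyfry]
    simp [pvSuffixes]
  | succ k ih =>
    rw [z7_dodaj_cyfry]
    have h1 : ¬ ((k + 1 : Nat) : Int) < 1 := by push_cast; omega
    have h2 : ((k + 1 : Nat) : Int) - 1 = (k : Int) := by push_cast; ring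
    rw [if_neg h1, z7_expand_eq, h2, ih]
    simp only [pvSuffixes]
    rw [List.flatMap_assoc]
    refine List.flatMap_congr (fun x _ => ?_)
    simp [List.flatMap_map, List.map_flatMap, List.map_map, Function.comp_def, List.append_assoc]

-- ===== VERDICT (by name: the statement is the Claim_ definition above) =====
theorem z7_dodaj_cyfry_spec : Claim_equal_z7_dodaj_cyfry := by
  intro xs n _
  unfold Spec_z7_dodaj_cyfry z7_dodaj_cyfry_alt
  by_cases h : n < 1
  · rw [z7_dodaj_cyfry, if_pos h, if_pos h]
  · rw [if_neg h]
    have hn : n = (n.toNat : Int) := by omega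
    rw [hn]
    exact z7_main n.toNat xs
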